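-- pv_equiv track=rewrite | github.com/struggl/DataStructure | python程序员面试宝典/字符串/5.5如何判断两个字符串的包含关系.py | isContain2
-- ===== SOURCE A (Python) =====
-- def isContain2(s1,s2):
-- 	if type(s1) != str or type(s2) != str:
-- 		return
-- 	if len(s1) == 0 or len(s2) == 0:
-- 		return False
-- 	if len(s1) < len(s2):
-- 		return False
-- 	Dict = dict()
-- 	for v in s2:
-- 		if not Dict.get(v):
-- 			Dict[v] = 1
-- 	for v in s1:
-- 		if Dict.get(v):
-- 			Dict[v] = 0
-- 	if sum(Dict.values()) == 0:
-- 		return True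
-- 	else:
-- 		return False
-- ===== SOURCE B (Python) =====
-- def isContain2(s1, s2):
--     if type(s1) != str or type(s2) != str:
--         return
--     if len(s1) == 0 or len(s2) == 0:
--         return False
--     if len(s1) < len(s2):
--         return False
--     return all(ch in s1 for ch in s2)
-- ===== Notes on version B (the rewrite author's own statement) =====
-- stated objective: simpler
-- what changed: Replaced the build-a-character-table dict, the marking pass over s1 and the sum-of-values test with a single all(ch in s1 for ch in s2) that scans s1 directly for each character of s2; the three guards are kept verbatim.
import Mathlib
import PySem

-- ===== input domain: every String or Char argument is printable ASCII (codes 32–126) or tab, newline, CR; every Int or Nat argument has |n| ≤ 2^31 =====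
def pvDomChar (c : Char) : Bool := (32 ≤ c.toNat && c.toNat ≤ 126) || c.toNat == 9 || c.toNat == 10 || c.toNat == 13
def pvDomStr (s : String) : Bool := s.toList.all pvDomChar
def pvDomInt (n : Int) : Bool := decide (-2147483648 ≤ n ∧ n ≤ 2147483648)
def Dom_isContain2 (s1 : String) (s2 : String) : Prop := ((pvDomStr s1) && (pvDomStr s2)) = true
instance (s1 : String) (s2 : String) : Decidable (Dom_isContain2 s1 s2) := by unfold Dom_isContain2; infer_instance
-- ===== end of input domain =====

-- B replaces A's dict-table build + marking pass + value-sum with a direct per-character scan of s1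
-- (all(ch in s1 for ch in s2)), keeping A's three guards; objective: simpler.
-- A's 'type(...) != str' guard (returning None) cannot fire under the Lean types and is therefore not portable.

-- ===== PORT A =====
def isContain2 (s1 : String) (s2 : String) : Option Bool :=
  -- 'if type(s1) != str or type(s2) != str: return' — unreachable with String arguments
  if PySem.Str.len s1 = 0 ∨ PySem.Str.len s2 = 0 then some false
  else if PySem.Str.len s1 < PySem.Str.len s2 then some false
  else
    -- Dict after 'for v in s2: if not Dict.get(v): Dict[v] = 1' (None and 0 are falsy),
    -- then 'for v in s1: if Dict.get(v): Dict[v] = 0', then 'sum(Dict.values()) == 0'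
    if (s1.toList.foldl (fun d v => if d.getD v 0 ≠ 0 then d.insert v 0 else d)
          (s2.toList.foldl (fun d v => if d.getD v 0 ≠ 0 then d else d.insert v 1)
            (PySem.Dict.empty : PySem.Dict Char Int))).values.sum = 0
    then some true else some false

-- ===== PORT B =====
def isContain2_alt (s1 : String) (s2 : String) : Option Bool :=
  if PySem.Str.len s1 = 0 ∨ PySem.Str.len s2 = 0 then some false
  else if PySem.Str.len s1 < PySem.Str.len s2 then some false
  else some (s2.toList.all (fun ch => s1.toList.contains ch))

-- ===== PRECONDITION & SPEC =====
def Spec_isContain2 (s1 : String) (s2 : String) (out : Option Bool) : Prop := out = isContain2_alt s1 s2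
instance (s1 : String) (s2 : String) (out : Option Bool) : Decidable (Spec_isContain2 s1 s2 out) := by unfold Spec_isContain2; infer_instance

-- ===== CLAIM (what is proved, stated in full; the proofs are below) =====
def Claim_equal_isContain2 : Prop := ∀ (s1 : String) (s2 : String), Dom_isContain2 s1 s2 → Spec_isContain2 s1 s2 (isContain2 s1 s2)

-- ===== LEMMAS AND PROOFS =====

-- characterization of the first loop: starting from a dict whose values are all 1,
-- every key of l ends up mapped to 1 and other keys are untouched
theorem pvFold1_get? (l : List Char) (d : PySem.Dict Char Int)
    (hinv : ∀ k, d.get? k = none ∨ d.get? k = some 1) (k : Char) :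
    (l.foldl (fun d v => if d.getD v 0 ≠ 0 then d else d.insert v 1) d).get? k
      = if k ∈ l then some 1 else d.get? k := by
  induction l generalizing d with
  | nil => simp
  | cons v t ih =>
    have hstep : ∀ j, ((if d.getD v 0 ≠ 0 then d else d.insert v 1) : PySem.Dict Char Int).get? j
        = if j = v then some 1 else d.get? j := by
      intro j
      by_cases hj : j = v
      · subst hj
        rcases hinv j with hv | hv
        · simp [PySem.Dict.getD_eq_get?_getD, hv]
        · simp [PySem.Dict.getD_eq_get?_getD, hv]
      · rcases hinv v with hv | hv
        · simp [PySem.Dict.getD_eq_get?_getD, hv, PySem.Dict.get?_insert, hj]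
        · simp [PySem.Dict.getD_eq_get?_getD, hv, hj]
    have hinv' : ∀ j, ((if d.getD v 0 ≠ 0 then d else d.insert v 1) : PySem.Dict Char Int).get? j
        = none ∨ ((if d.getD v 0 ≠ 0 then d else d.insert v 1) : PySem.Dict Char Int).get? j = some 1 := by
      intro j; rw [hstep j]; by_cases hj : j = v
      · rw [if_pos hj]; right; rfl
      · rw [if_neg hj]; exact hinv j
    simp only [List.foldl_cons]
    rw [ih _ hinv', hstep k]
    by_cases ht : k ∈ t <;> by_cases hv : k = v <;> simp [ht, hv]

theorem pvFold1_nodup (l : List Char) (d : PySem.Dict Char Int) (h : d.keys.Nodup) :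
    (l.foldl (fun d v => if d.getD v 0 ≠ 0 then d else d.insert v 1) d).keys.Nodup := by
  induction l generalizing d with
  | nil => simpa
  | cons v t ih =>
    simp only [List.foldl_cons]
    apply ih
    split
    · exact h
    · exact PySem.Dict.nodup_keys_insert d v 1 h

-- characterization of the second loop: keys with value 1 that occur in l are zeroed, nothing else moves
theorem pvFold2_get? (l : List Char) (d : PySem.Dict Char Int)
    (hinv : ∀ k, d.get? k = none ∨ d.get? k = some 0 ∨ d.get? k = some 1) (k : Char) :
    (l.foldl (fun d v => if d.getD v 0 ≠ 0 then d.insert v 0 else d) d).get? k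
      = if k ∈ l ∧ d.get? k = some 1 then some 0 else d.get? k := by
  induction l generalizing d with
  | nil => simp
  | cons v t ih =>
    have hstep : ∀ j, ((if d.getD v 0 ≠ 0 then d.insert v 0 else d) : PySem.Dict Char Int).get? j
        = if j = v ∧ d.get? j = some 1 then some 0 else d.get? j := by
      intro j
      by_cases hj : j = v
      · subst hj
        rcases hinv j with hv | hv | hv
        · simp [PySem.Dict.getD_eq_get?_getD, hv]
        · simp [PySem.Dict.getD_eq_get?_getD, hv]
        · simp [PySem.Dict.getD_eq_get?_getD, hv]
      · rcases hinv v with hv | hv | hv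
        · simp [PySem.Dict.getD_eq_get?_getD, hv, hj]
        · simp [PySem.Dict.getD_eq_get?_getD, hv, hj]
        · simp [PySem.Dict.getD_eq_get?_getD, hv, PySem.Dict.get?_insert, hj]
    have hinv' : ∀ j, ((if d.getD v 0 ≠ 0 then d.insert v 0 else d) : PySem.Dict Char Int).get? j
        = none ∨ ((if d.getD v 0 ≠ 0 then d.insert v 0 else d) : PySem.Dict Char Int).get? j = some 0
        ∨ ((if d.getD v 0 ≠ 0 then d.insert v 0 else d) : PySem.Dict Char Int).get? j = some 1 := by
      intro j; rw [hstep j]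
      by_cases hj : j = v ∧ d.get? j = some 1
      · rw [if_pos hj]; right; left; rfl
      · rw [if_neg hj]; exact hinv j
    simp only [List.foldl_cons]
    rw [ih _ hinv', hstep k]
    by_cases hv : k = v
    · subst hv
      by_cases h1 : d.get? k = some 1 <;> simp [h1]
    · by_cases h1 : d.get? k = some 1 <;> by_cases ht : k ∈ t <;> simp [hv, h1, ht]

theorem pvFold2_keys (l : List Char) (d : PySem.Dict Char Int) :
    (l.foldl (fun d v => if d.getD v 0 ≠ 0 then d.insert v 0 else d) d).keys = d.keys := by
  induction l generalizing d with
  | nil => simp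
  | cons v t ih =>
    simp only [List.foldl_cons]
    rw [ih]
    split
    case isTrue h =>
      apply PySem.Dict.keys_insert_of_contains
      rw [PySem.Dict.contains_eq_isSome_get?]
      rcases Option.eq_none_or_eq_some (d.get? v) with hv | ⟨x, hv⟩
      · simp [PySem.Dict.getD_eq_get?_getD, hv] at h
      · simp [hv]
    case isFalse h => rfl

-- the dict pipeline computes exactly "every char of s2 occurs in s1"
theorem pvCore (l1 l2 : List Char) (d1 d2 : PySem.Dict Char Int)
    (hd1 : d1 = l2.foldl (fun d v => if d.getD v 0 ≠ 0 then d else d.insert v 1) PySem.Dict.empty)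
    (hd2 : d2 = l1.foldl (fun d v => if d.getD v 0 ≠ 0 then d.insert v 0 else d) d1) :
    (d2.values.sum = 0) ↔ (∀ c ∈ l2, c ∈ l1) := by
  have hinv0 : ∀ k, (PySem.Dict.empty : PySem.Dict Char Int).get? k = none ∨
      (PySem.Dict.empty : PySem.Dict Char Int).get? k = some 1 := by
    intro k; left; simp
  have h1 : ∀ k, d1.get? k = if k ∈ l2 then some 1 else none := by
    intro k; rw [hd1, pvFold1_get? l2 _ hinv0 k]; simp
  have hinv1 : ∀ k, d1.get? k = none ∨ d1.get? k = some 0 ∨ d1.get? k = some 1 := by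
    intro k; rw [h1 k]; by_cases h : k ∈ l2 <;> simp [h]
  have h2 : ∀ k, d2.get? k = if k ∈ l2 then (if k ∈ l1 then some 0 else some 1) else none := by
    intro k; rw [hd2, pvFold2_get? l1 _ hinv1 k, h1 k]
    by_cases h2' : k ∈ l2 <;> by_cases h1' : k ∈ l1 <;> simp [h2', h1']
  have hnd1 : d1.keys.Nodup := hd1 ▸ pvFold1_nodup l2 _ (by simp)
  have hkeys : d2.keys = d1.keys := hd2 ▸ pvFold2_keys l1 d1
  have hnd2 : d2.keys.Nodup := hkeys ▸ hnd1
  have hmemkeys : ∀ k, k ∈ d2.keys ↔ k ∈ l2 := by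
    intro k
    rw [hkeys, ← not_iff_not, ← PySem.Dict.get?_eq_none_iff_not_mem_keys, h1 k]
    by_cases h : k ∈ l2 <;> simp [h]
  have hvals : d2.values = d2.keys.map (fun k => if (!(l1.contains k)) = true then (1 : Int) else 0) := by
    rw [PySem.Dict.values_eq_map_keys d2 hnd2 0]
    apply List.map_congr_left
    intro k hk
    have hk2 : k ∈ l2 := (hmemkeys k).mp hk
    rw [PySem.Dict.getD_eq_get?_getD, h2 k]
    by_cases h1' : k ∈ l1 <;> simp [hk2, h1']
  rw [hvals, PySem.List.sum_map_ite_one_zero]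
  rw [Int.natCast_eq_zero, List.countP_eq_zero]
  constructor
  · intro h c hc
    have := h c ((hmemkeys c).mpr hc)
    simpa using this
  · intro h k hk
    simpa using h k ((hmemkeys k).mp hk)

-- ===== VERDICT (by name: the statement is the Claim_ definition above) =====
theorem isContain2_spec : Claim_equal_isContain2 := by
  intro s1 s2 _
  unfold Spec_isContain2 isContain2 isContain2_alt
  split
  · rfl
  · split
    · rfl
    · have hiff := pvCore s1.toList s2.toList _ _ rfl rfl
      by_cases h : ∀ c ∈ s2.toList, c ∈ s1.toList
      · rw [if_pos (hiff.mpr h)]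
        have hall : (s2.toList.all fun ch => s1.toList.contains ch) = true := by
          rw [List.all_eq_true]; intro c hc; simpa using h c hc
        rw [hall]
      · rw [if_neg (fun hs => h (hiff.mp hs))]
        have hall : (s2.toList.all fun ch => s1.toList.contains ch) = false := by
          rw [List.all_eq_false]
          simp only [not_forall] at h
          obtain ⟨c, hc, hc1⟩ := h
          exact ⟨c, by simpa using hc, by simpa using hc1⟩
        rw [hall]
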